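/- GENERATED by mk_final_copies.py from the proof of the farm's unit `inverse_mdct.7a` (farm:inverse_mdct.7a.1: Proof.lean) as the
   re-elaboration sweep compiled it — do not edit. -/
import Asan.CheckWalk
import Vorbis.Spec.MdctUse
import Vorbis.Spec.Units.inverse_mdct_7a
import Vorbis.Spec.Worked.inverse_mdct_7a_Lemmas

open X86 X86.User Asan Vorbis Vorbis.Spec

set_option maxRecDepth 4000
set_option maxHeartbeats 4000000

namespace Vorbis.Spec.inverse_mdct_7a

/-- The entry assertion of segment 7 is the invariant of the second `l` loop with `l = lmid k`. -/
theorem atOuter_of_at7 {u₀ : State} {others : List Obj} {frames : List (Nat × FrameLayout)} {len : Nat} {A : Arena}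
    {stored room : Int} {ysz : Nat → Nat} {k c : Nat} {ue : State} {ret : Word} {v : State}
    (hat : inverse_mdct.At7 u₀ others frames len A stored room ysz k c ue ret v) :
    AtOuter u₀ others frames len A stored room ysz k c ue ret (Mdct.lmid k) v :=
  { rip := hat.rip
    frame := hat.frame7
    rdi := hat.rdi
    lo := Nat.le_refl _
    hi := Nat.le_max_left _ _ }

end Vorbis.Spec.inverse_mdct_7a

/-- Segment 7a of `inverse_mdct` (`loop7` 0x1098f2 … `cut19` 0x109963): the second `l` loop (`outer_loop` of Lemmas.lean: `head_step`,
`inner_step`, both loops by `ReachVia.loop`) from the entry assertion `At7` to the state imdct_step3_inner_s_loop_ld654 returned. -/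
theorem Vorbis.Spec.Worked.inverse_mdct_7a_ok : Vorbis.Spec.inverse_mdct_7a.Statement := by
  intro Lay hLay μ hμ u₀ hcode h_s h_ld others frames len A stored room ysz k c ue ret v hat
  exact Vorbis.Spec.inverse_mdct_7a.outer_loop hLay hμ hcode h_s h_ld v ⟨_, Vorbis.Spec.inverse_mdct_7a.atOuter_of_at7 hat⟩
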